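-- pv_equiv track=rewrite | github.com/notawallheater/plover_controller_fork | plover_controller/util.py | get_keys_for_stroke
-- ===== SOURCE A (Python) =====
-- def get_keys_for_stroke(stroke_str: str) -> tuple[str, ...]:
--     keys = list[str]()
--     passed_hyphen = False
--     no_hyphen_keys = set("!@#$%^&*")
--     for key in stroke_str:
--         if key == "-":
--             passed_hyphen = True
--             continue
--         if key in no_hyphen_keys:
--             keys.append(key)
--         elif passed_hyphen:
--             keys.append(f"-{key}")
--         else:
--             keys.append(f"{key}-")
--     return tuple(keys)
-- ===== SOURCE B (Python) =====
-- def get_keys_for_stroke(stroke_str: str) -> tuple[str, ...]: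
--     specials = "!@#$%^&*"
--     before, _, after = stroke_str.partition("-")
--     keys = [k if k in specials else f"{k}-" for k in before]
--     keys += [k if k in specials else f"-{k}" for k in after if k != "-"]
--     return tuple(keys)
-- ===== Notes on version B (the rewrite author's own statement) =====
-- stated objective: alternative
-- what changed: Replaces the single loop with a monotone passed_hyphen flag by a partition at the first hyphen and two differently-shaped comprehension passes (suffix '-' before, prefix '-' after, extra hyphens filtered).
import Mathlib
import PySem

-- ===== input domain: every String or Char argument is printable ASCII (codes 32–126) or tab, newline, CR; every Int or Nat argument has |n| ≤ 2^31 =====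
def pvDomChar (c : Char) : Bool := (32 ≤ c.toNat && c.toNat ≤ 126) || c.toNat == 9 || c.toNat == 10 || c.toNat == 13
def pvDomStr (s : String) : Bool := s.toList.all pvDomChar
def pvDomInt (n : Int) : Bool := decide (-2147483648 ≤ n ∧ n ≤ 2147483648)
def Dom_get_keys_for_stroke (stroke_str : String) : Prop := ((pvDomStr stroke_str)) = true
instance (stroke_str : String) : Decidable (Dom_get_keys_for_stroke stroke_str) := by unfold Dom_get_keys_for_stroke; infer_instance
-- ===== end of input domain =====

-- B replaces A's single loop with a passed_hyphen flag by a partition at the first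
-- hyphen and two differently-shaped passes (objective: alternative decomposition).

-- ===== PORT A =====
-- membership in set("!@#$%^&*")
def pvNoHyphenKey (c : Char) : Bool := "!@#$%^&*".toList.contains c

-- A's for-loop: state = (keys accumulator, passed_hyphen flag)
def pvLoopA : List Char → List String → Bool → List String
  | [], keys, _ => keys
  | c :: cs, keys, passed =>
    if c = '-' then pvLoopA cs keys true
    else if pvNoHyphenKey c then pvLoopA cs (keys ++ [String.ofList [c]]) passed
    else if passed then pvLoopA cs (keys ++ [String.ofList ['-', c]]) passed
    else pvLoopA cs (keys ++ [String.ofList [c, '-']]) passed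

def get_keys_for_stroke (stroke_str : String) : List String :=
  pvLoopA stroke_str.toList [] false

-- ===== PORT B =====
def get_keys_for_stroke_alt (stroke_str : String) : List String :=
  let l := stroke_str.toList
  -- stroke_str.partition("-"): part before the first hyphen, part after it
  let before := l.takeWhile (· ≠ '-')
  let after := (l.dropWhile (· ≠ '-')).drop 1
  before.map (fun k => if pvNoHyphenKey k then String.ofList [k] else String.ofList [k, '-'])
    ++ ((after.filter (· ≠ '-')).map
        (fun k => if pvNoHyphenKey k then String.ofList [k] else String.ofList ['-', k]))

-- ===== PRECONDITION & SPEC =====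
def Spec_get_keys_for_stroke (stroke_str : String) (out : List String) : Prop := out = get_keys_for_stroke_alt stroke_str
instance (stroke_str : String) (out : List String) : Decidable (Spec_get_keys_for_stroke stroke_str out) := by unfold Spec_get_keys_for_stroke; infer_instance

-- ===== CLAIM (what is proved, stated in full; the proofs are below) =====
def Claim_equal_get_keys_for_stroke : Prop := ∀ (stroke_str : String), Dom_get_keys_for_stroke stroke_str → Spec_get_keys_for_stroke stroke_str (get_keys_for_stroke stroke_str)

-- ===== LEMMAS AND PROOFS =====
theorem pvLoopA_acc (cs : List Char) : ∀ (keys : List String) (p : Bool),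
    pvLoopA cs keys p = keys ++ pvLoopA cs [] p := by
  induction cs with
  | nil => intro keys p; simp [pvLoopA]
  | cons c cs ih =>
    intro keys p
    by_cases hc : c = '-'
    · rw [pvLoopA, if_pos hc, pvLoopA, if_pos hc, ih keys, ih ([] : List String)]
    · by_cases hs : pvNoHyphenKey c = true
      · rw [pvLoopA, if_neg hc, if_pos hs, pvLoopA, if_neg hc, if_pos hs,
          ih (keys ++ [String.ofList [c]]), ih ([] ++ [String.ofList [c]])]
        simp
      · cases p with
        | true =>
          rw [pvLoopA, if_neg hc, if_neg (by simp [hs]), if_pos rfl,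
            pvLoopA, if_neg hc, if_neg (by simp [hs]), if_pos rfl,
            ih (keys ++ [String.ofList ['-', c]]), ih ([] ++ [String.ofList ['-', c]])]
          simp
        | false =>
          rw [pvLoopA, if_neg hc, if_neg (by simp [hs]), if_neg (by simp),
            pvLoopA, if_neg hc, if_neg (by simp [hs]), if_neg (by simp),
            ih (keys ++ [String.ofList [c, '-']]), ih ([] ++ [String.ofList [c, '-']])]
          simp

theorem pvLoopA_true (cs : List Char) :
    pvLoopA cs [] true = (cs.filter (· ≠ '-')).map
      (fun k => if pvNoHyphenKey k then String.ofList [k] else String.ofList ['-', k]) := by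
  induction cs with
  | nil => simp [pvLoopA]
  | cons c cs ih =>
    by_cases hc : c = '-'
    · simp [pvLoopA, hc, ih]
    · by_cases hs : pvNoHyphenKey c = true
      · rw [pvLoopA, if_neg hc, if_pos hs, pvLoopA_acc]
        simp [hc, hs, ih]
      · rw [pvLoopA, if_neg hc, if_neg (by simp [hs]), if_pos rfl, pvLoopA_acc]
        simp [hc, hs, ih]

theorem pvLoopA_false (cs : List Char) :
    pvLoopA cs [] false =
      (cs.takeWhile (· ≠ '-')).map
        (fun k => if pvNoHyphenKey k then String.ofList [k] else String.ofList [k, '-'])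
      ++ ((((cs.dropWhile (· ≠ '-')).drop 1).filter (· ≠ '-')).map
        (fun k => if pvNoHyphenKey k then String.ofList [k] else String.ofList ['-', k])) := by
  induction cs with
  | nil => simp [pvLoopA]
  | cons c cs ih =>
    by_cases hc : c = '-'
    · simp [pvLoopA, hc, pvLoopA_true]
    · by_cases hs : pvNoHyphenKey c = true
      · rw [pvLoopA, if_neg hc, if_pos hs, pvLoopA_acc]
        simp [hc, hs, ih]
      · rw [pvLoopA, if_neg hc, if_neg (by simp [hs]), if_neg (by simp), pvLoopA_acc]
        simp [hc, hs, ih]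

-- ===== VERDICT (by name: the statement is the Claim_ definition above) =====
theorem get_keys_for_stroke_spec : Claim_equal_get_keys_for_stroke := by
  intro s _
  unfold Spec_get_keys_for_stroke get_keys_for_stroke get_keys_for_stroke_alt
  exact pvLoopA_false s.toList
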